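-- pv_equiv track=rewrite | github.com/DoudouFanClub/soba-metrics | mongo_metrics.py | count_lines_from_text
-- ===== SOURCE A (Python) =====
-- def count_lines_from_text(text, marker='```'):
--         loc = 0
--         sentences = 0
--         in_code_block = False
--         for line in text.split('\n'):
--             if marker in line:
--                 in_code_block = not in_code_block
--             elif in_code_block:
--                 loc += 1
--             elif not in_code_block:
--                 sentences += 1
--         return (loc, sentences)
-- ===== SOURCE B (Python) =====
-- def count_lines_from_text(text, marker='```'):
--     lines = text.split('\n')
--     idx = [i for i, line in enumerate(lines) if marker in line]
--     loc = 0
--     sentences = 0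
--     prev = -1
--     for k, i in enumerate(idx):
--         if k % 2 == 0:
--             sentences += i - prev - 1
--         else:
--             loc += i - prev - 1
--         prev = i
--     if len(idx) % 2 == 0:
--         sentences += len(lines) - 1 - prev
--     else:
--         loc += len(lines) - 1 - prev
--     return (loc, sentences)
-- ===== Notes on version B (the rewrite author's own statement) =====
-- stated objective: alternative
-- what changed: Replaces A's single line-by-line scan with an in_code_block toggle by first building the index list of marker-containing lines and then computing the two counts from the gaps between consecutive marker positions, assigning each gap to sentences or loc by the parity of the number of markers before it.
import Mathlib
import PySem

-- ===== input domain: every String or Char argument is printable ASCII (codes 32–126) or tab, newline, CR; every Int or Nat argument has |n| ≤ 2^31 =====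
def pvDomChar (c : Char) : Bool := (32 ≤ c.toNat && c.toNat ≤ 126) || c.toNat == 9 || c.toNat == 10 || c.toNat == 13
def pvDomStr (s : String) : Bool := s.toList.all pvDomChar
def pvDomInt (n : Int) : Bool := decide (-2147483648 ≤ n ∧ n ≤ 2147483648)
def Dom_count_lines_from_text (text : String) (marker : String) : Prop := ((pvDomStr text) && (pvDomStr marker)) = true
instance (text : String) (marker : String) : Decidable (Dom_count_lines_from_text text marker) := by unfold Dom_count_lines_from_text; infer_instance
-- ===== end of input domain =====

-- B replaces A's line-by-line toggle scan with a marker-index list plus parity-of-gap arithmetic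
-- (objective: alternative decomposition; same return value, no side effects in either version).

-- ===== PORT A =====
-- A's for-loop over text.split('\n') with the in_code_block toggle, as structural recursion.
def aLoop (marker : String) : List String → Bool → Int → Int → Int × Int
  | [], _, loc, sentences => (loc, sentences)
  | line :: rest, inCode, loc, sentences =>
    if PySem.Str.isIn marker line then aLoop marker rest (!inCode) loc sentences
    else if inCode then aLoop marker rest inCode (loc + 1) sentences
    else aLoop marker rest inCode loc (sentences + 1)

def count_lines_from_text (text : String) (marker : String) : Int × Int :=
  aLoop marker ((PySem.Str.split? text "\n").getD []) false 0 0

-- ===== PORT B =====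
-- idx = [i for i, line in enumerate(lines) if marker in line]
def bIdx (marker : String) (pairs : List (Int × String)) : List Int :=
  pairs.filterMap (fun p => if PySem.Str.isIn marker p.2 then some p.1 else none)

-- the for-loop over enumerate(idx), state (loc, sentences, prev)
def bLoop : List (Int × Int) → Int → Int → Int → Int × Int × Int
  | [], loc, sentences, prev => (loc, sentences, prev)
  | (k, i) :: rest, loc, sentences, prev =>
    if PySem.Int.mod k 2 = 0 then bLoop rest loc (sentences + (i - prev - 1)) i
    else bLoop rest (loc + (i - prev - 1)) sentences i

def count_lines_from_text_alt (text : String) (marker : String) : Int × Int :=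
  let lines := (PySem.Str.split? text "\n").getD []
  let idx := bIdx marker (PySem.List.enumerate lines)
  match bLoop (PySem.List.enumerate idx) 0 0 (-1) with
  | (loc, sentences, prev) =>
    if PySem.Int.mod (idx.length : Int) 2 = 0 then
      (loc, sentences + ((lines.length : Int) - 1 - prev))
    else
      (loc + ((lines.length : Int) - 1 - prev), sentences)

-- ===== PRECONDITION & SPEC =====
def Spec_count_lines_from_text (text : String) (marker : String) (out : Int × Int) : Prop := out = count_lines_from_text_alt text marker
instance (text : String) (marker : String) (out : Int × Int) : Decidable (Spec_count_lines_from_text text marker out) := by unfold Spec_count_lines_from_text; infer_instance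

-- ===== CLAIM (what is proved, stated in full; the proofs are below) =====
def Claim_equal_count_lines_from_text : Prop := ∀ (text : String) (marker : String), Dom_count_lines_from_text text marker → Spec_count_lines_from_text text marker (count_lines_from_text text marker)

-- ===== LEMMAS AND PROOFS =====

-- B's loop + tail, fused into one recursion (used only by the proofs).
def bRun (n : Int) : List Int → Int → Int → Int → Int → Int × Int
  | [], k, loc, sentences, prev =>
    if PySem.Int.mod k 2 = 0 then (loc, sentences + (n - 1 - prev))
    else (loc + (n - 1 - prev), sentences)
  | i :: rest, k, loc, sentences, prev =>
    if PySem.Int.mod k 2 = 0 then bRun n rest (k + 1) loc (sentences + (i - prev - 1)) i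
    else bRun n rest (k + 1) (loc + (i - prev - 1)) sentences i

lemma pmod_succ (k : Int) :
    PySem.Int.mod (k + 1) 2 = 0 ↔ ¬ PySem.Int.mod k 2 = 0 := by
  simp only [PySem.Int.mod, Int.fmod_eq_emod]
  norm_num
  omega

lemma bIdx_cons (marker l : String) (rest : List String) (s : Int) :
    bIdx marker (PySem.List.enumerate (l :: rest) s)
    = if PySem.Str.isIn marker l then s :: bIdx marker (PySem.List.enumerate rest (s + 1))
      else bIdx marker (PySem.List.enumerate rest (s + 1)) := by
  rw [PySem.List.enumerate_cons]
  by_cases hl : PySem.Chars.isIn marker.toList l.toList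
  · simp [bIdx, hl]
  · simp [bIdx, hl]

-- B's loop over enumerate(idx) followed by the tail addition equals bRun.
lemma bLoop_tail (idx : List Int) :
    ∀ (k0 loc sentences prev n a b c : Int),
    bLoop (PySem.List.enumerate idx k0) loc sentences prev = (a, b, c) →
    (if PySem.Int.mod (k0 + (idx.length : Int)) 2 = 0 then (a, b + (n - 1 - c))
     else (a + (n - 1 - c), b))
    = bRun n idx k0 loc sentences prev := by
  induction idx with
  | nil =>
    intro k0 loc sentences prev n a b c h
    rw [PySem.List.enumerate_nil] at h
    simp only [bLoop, Prod.mk.injEq] at h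
    obtain ⟨h1, h2, h3⟩ := h
    subst h1; subst h2; subst h3
    simp [bRun]
  | cons i rest ih =>
    intro k0 loc sentences prev n a b c h
    rw [PySem.List.enumerate_cons] at h
    have hc : k0 + (((i :: rest).length : Int)) = (k0 + 1) + (rest.length : Int) := by
      push_cast [List.length_cons]; ring
    rw [hc]
    by_cases hk : PySem.Int.mod k0 2 = 0
    · rw [show bLoop ((k0, i) :: PySem.List.enumerate rest (k0 + 1)) loc sentences prev
            = bLoop (PySem.List.enumerate rest (k0 + 1)) loc (sentences + (i - prev - 1)) i from by
          simp only [bLoop]; rw [if_pos hk]] at h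
      rw [ih (k0 + 1) loc (sentences + (i - prev - 1)) i n a b c h]
      simp only [bRun]; rw [if_pos hk]
    · rw [show bLoop ((k0, i) :: PySem.List.enumerate rest (k0 + 1)) loc sentences prev
            = bLoop (PySem.List.enumerate rest (k0 + 1)) (loc + (i - prev - 1)) sentences i from by
          simp only [bLoop]; rw [if_neg hk]] at h
      rw [ih (k0 + 1) (loc + (i - prev - 1)) sentences i n a b c h]
      simp only [bRun]; rw [if_neg hk]

-- Key invariant: gap/parity accounting over the marker index list equals A's toggle scan
-- (`s` = position of the first remaining line, `p` = previous bound, `k` = markers seen so far).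
lemma bRun_eq_aLoop (marker : String) (lines : List String) :
    ∀ (s p k loc sentences : Int),
    bRun (s + (lines.length : Int)) (bIdx marker (PySem.List.enumerate lines s)) k loc sentences p
    = (if PySem.Int.mod k 2 = 0
       then aLoop marker lines false loc (sentences + (s - 1 - p))
       else aLoop marker lines true (loc + (s - 1 - p)) sentences) := by
  induction lines with
  | nil =>
    intro s p k loc sentences
    simp only [PySem.List.enumerate_nil, bIdx, List.filterMap_nil, bRun, aLoop,
      List.length_nil, Nat.cast_zero, add_zero]
  | cons l rest ih =>
    intro s p k loc sentences
    have hn : s + (((l :: rest).length : Int)) = (s + 1) + (rest.length : Int) := by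
      push_cast [List.length_cons]; ring
    rw [bIdx_cons, hn]
    by_cases hl : PySem.Str.isIn marker l
    · have hlc : PySem.Chars.isIn marker.toList l.toList = true := by simpa using hl
      rw [if_pos hl]
      by_cases hk : PySem.Int.mod k 2 = 0
      · have hk1 : ¬ PySem.Int.mod (k + 1) 2 = 0 := by rw [pmod_succ]; exact not_not_intro hk
        rw [show bRun ((s + 1) + (rest.length : Int))
                (s :: bIdx marker (PySem.List.enumerate rest (s + 1))) k loc sentences p
              = bRun ((s + 1) + (rest.length : Int)) (bIdx marker (PySem.List.enumerate rest (s + 1)))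
                  (k + 1) loc (sentences + (s - p - 1)) s from by simp only [bRun]; rw [if_pos hk]]
        rw [ih (s + 1) s (k + 1) loc (sentences + (s - p - 1)), if_neg hk1, if_pos hk]
        have e1 : loc + ((s + 1) - 1 - s) = loc := by ring
        have e2 : sentences + (s - p - 1) = sentences + (s - 1 - p) := by ring
        rw [e1, e2]
        simp [aLoop, hlc]
      · have hk1 : PySem.Int.mod (k + 1) 2 = 0 := by rw [pmod_succ]; exact hk
        rw [show bRun ((s + 1) + (rest.length : Int))
                (s :: bIdx marker (PySem.List.enumerate rest (s + 1))) k loc sentences p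
              = bRun ((s + 1) + (rest.length : Int)) (bIdx marker (PySem.List.enumerate rest (s + 1)))
                  (k + 1) (loc + (s - p - 1)) sentences s from by simp only [bRun]; rw [if_neg hk]]
        rw [ih (s + 1) s (k + 1) (loc + (s - p - 1)) sentences, if_pos hk1, if_neg hk]
        have e1 : sentences + ((s + 1) - 1 - s) = sentences := by ring
        have e2 : loc + (s - p - 1) = loc + (s - 1 - p) := by ring
        rw [e1, e2]
        simp [aLoop, hlc]
    · have hlc : PySem.Chars.isIn marker.toList l.toList = false := by simpa using hl
      rw [if_neg hl]
      rw [ih (s + 1) p k loc sentences]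
      by_cases hk : PySem.Int.mod k 2 = 0
      · rw [if_pos hk, if_pos hk]
        have e : sentences + ((s + 1) - 1 - p) = (sentences + (s - 1 - p)) + 1 := by ring
        rw [e]
        simp [aLoop, hlc]
      · rw [if_neg hk, if_neg hk]
        have e : loc + ((s + 1) - 1 - p) = (loc + (s - 1 - p)) + 1 := by ring
        rw [e]
        simp [aLoop, hlc]

lemma key (marker : String) (lines : List String) :
    (match bLoop (PySem.List.enumerate (bIdx marker (PySem.List.enumerate lines))) 0 0 (-1) with
     | (loc, sentences, prev) =>
       if PySem.Int.mod (((bIdx marker (PySem.List.enumerate lines)).length : Int)) 2 = 0 then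
         (loc, sentences + ((lines.length : Int) - 1 - prev))
       else (loc + ((lines.length : Int) - 1 - prev), sentences))
    = aLoop marker lines false 0 0 := by
  rcases hbl : bLoop (PySem.List.enumerate (bIdx marker (PySem.List.enumerate lines))) 0 0 (-1)
    with ⟨a, b, c⟩
  have h1 := bLoop_tail (bIdx marker (PySem.List.enumerate lines)) 0 0 0 (-1)
      ((lines.length : Int)) a b c hbl
  have h2 := bRun_eq_aLoop marker lines 0 (-1) 0 0 0
  simp only [zero_add] at h1 h2
  have h3 : (if PySem.Int.mod (0 : Int) 2 = 0
      then aLoop marker lines false 0 (0 - 1 - -1)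
      else aLoop marker lines true (0 - 1 - -1) 0) = aLoop marker lines false 0 0 := by
    rw [if_pos (show PySem.Int.mod 0 2 = 0 from by decide)]
    norm_num
  exact h1.trans (h2.trans h3)

-- ===== VERDICT (by name: the statement is the Claim_ definition above) =====
theorem count_lines_from_text_spec : Claim_equal_count_lines_from_text := by
  intro text marker _
  exact (key marker ((PySem.Str.split? text "\n").getD [])).symm
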